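-- pv_equiv track=rewrite | github.com/epayet/advent-of-code | advent/twentytwentyfive/day3.py | get_max_joltage_v2
-- ===== SOURCE A (Python) =====
-- def get_max_joltage_v2(bank: str) -> int:
--     max_digit_location, max_digit = -1, 0
--     max_joltage = ""
--     max_length = 12
--     for i in range(max_length):
--         max_digit_location, max_digit = get_max_digit(bank, max_digit_location + 1, max_length - i)
--         max_joltage += str(max_digit)
--     return int(max_joltage)
--
-- def get_max_digit(bank, start, max_length) -> tuple[int, int]:
--     max_digit_location = start
--     max_digit = 0
--     end = len(bank) - max_length + 1
--     for i, digit in enumerate(bank[start:end]):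
--         int_digit = int(digit)
--         if int_digit > max_digit:
--             max_digit = int_digit
--             max_digit_location = start + i
--     return max_digit_location, max_digit
-- ===== SOURCE B (Python) =====
-- def get_max_joltage_v2(bank: str) -> int:
--     # Monotonic-stack selection of the largest 12-digit subsequence in one pass.
--     # With fewer than 12 batteries no 12-digit joltage exists: return 0.
--     if len(bank) < 12:
--         return 0
--     stack = []
--     for i, c in enumerate(bank):
--         d = int(c)
--         while stack and stack[-1] < d and len(stack) + (len(bank) - i) > 12:
--             stack.pop()
--         if len(stack) < 12:
--             stack.append(d)
--     return int("".join(str(d) for d in stack))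
-- ===== Notes on version B (the rewrite author's own statement) =====
-- stated objective: idiomatic
-- what changed: A runs 12 greedy passes, each rescanning a shrinking window for its leftmost maximum digit and concatenating a string; B makes one left-to-right pass with a monotonic stack (pop smaller digits while enough remain to refill 12), returning 0 for banks of fewer than 12 batteries.
-- outside the precondition, e.g. on get_max_joltage_v2('910000'): A returns 910000000000, B returns 0
import Mathlib
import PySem

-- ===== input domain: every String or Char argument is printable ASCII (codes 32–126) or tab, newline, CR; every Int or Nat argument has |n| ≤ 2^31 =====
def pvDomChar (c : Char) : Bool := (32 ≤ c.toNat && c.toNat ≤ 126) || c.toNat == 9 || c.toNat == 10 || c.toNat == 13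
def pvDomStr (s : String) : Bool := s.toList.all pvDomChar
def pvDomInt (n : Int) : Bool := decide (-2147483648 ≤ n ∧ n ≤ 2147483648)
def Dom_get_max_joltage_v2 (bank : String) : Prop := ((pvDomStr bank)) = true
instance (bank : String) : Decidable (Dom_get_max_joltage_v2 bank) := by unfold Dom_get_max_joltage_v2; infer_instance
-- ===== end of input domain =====

-- B replaces A's 12 greedy window rescans by a single monotonic-stack pass; on banks of
-- fewer than 12 batteries B returns 0 (Pre_ below states the one such corner where A's value differs).
-- ===== PORT A =====
-- port of get_max_digit: scans bank[start:end] keeping the first index of the running strict maximum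
def get_max_digit (bank : String) (start : Int) (max_length : Int) : Int × Int :=
  let e : Int := (bank.length : Int) - max_length + 1
  (PySem.List.enumerate (PySem.Str.slice bank (some start) (some e)).toList 0).foldl
    (fun (st : Int × Int) (p : Int × Char) =>
      let int_digit : Int := (PySem.Int.ofStr? (String.singleton p.2)).getD 0
      if int_digit > st.2 then (start + p.1, int_digit) else st)
    (start, 0)

-- int(digit) / int(max_joltage) are ported via PySem.Int.ofStr?; the .getD 0 default is never
-- reached under Pre_ (every scanned character is a digit, and the accumulated string is 12 digit chars)
def get_max_joltage_v2 (bank : String) : Int :=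
  let st := (PySem.List.pyRange 0 12 1).foldl
    (fun (s : Int × Int × String) (i : Int) =>
      let r := get_max_digit bank (s.1 + 1) (12 - i)
      (r.1, r.2, s.2.2 ++ PySem.Int.toStr r.2))
    ((-1 : Int), (0 : Int), "")
  (PySem.Int.ofStr? st.2.2).getD 0

-- ===== PORT B =====
-- the `while stack and stack[-1] < d and len(stack) + (len(bank) - i) > 12: stack.pop()` loop;
-- the stack is stored top-first (Python appends/pops at the right end), rem = len(bank) - i
def bPop (d : Int) (rem : Nat) : List Int → List Int
  | [] => []
  | x :: s => if x < d ∧ s.length + 1 + rem > 12 then bPop d rem s else x :: s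

-- the `for i, c in enumerate(bank)` loop; len(bank) - i = (length of the rest incl. c) = t.length + 1
def bLoop : List Int → List Char → List Int
  | stack, [] => stack
  | stack, c :: t =>
    let d := (PySem.Int.ofStr? (String.singleton c)).getD 0   -- d = int(c)
    let s' := bPop d (t.length + 1) stack
    bLoop (if s'.length < 12 then d :: s' else s') t

def get_max_joltage_v2_alt (bank : String) : Int :=
  if bank.length < 12 then 0
  else (PySem.Int.ofStr? (PySem.Str.join "" (((bLoop [] bank.toList).reverse).map PySem.Int.toStr))).getD 0

-- ===== PRECONDITION & SPEC =====
-- Pre_ is A's returning domain minus one degenerate corner. A returns normally (everything else raises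
-- ValueError in int(digit)) for length ≤ 5 or = 11 (every window empty), length 6..10 with the first
-- length-1 characters digits (the wrapped negative slice ends scan exactly those), and length ≥ 12 all
-- digits. Pre_ excludes banks of 6..10 batteries with a nonzero digit among the first length-1
-- characters: a bank of fewer than 12 batteries has no 12-digit joltage, and A and B follow different
-- conventions there (A zero-pads the digits of a partial wrapped scan, e.g. 910000000000 for "910000";
-- B returns 0, as A itself does on every other bank of fewer than 12 batteries).
def Pre_get_max_joltage_v2 (bank : String) : Prop :=
  bank.length ≤ 5 ∨ bank.length = 11 ∨
    (bank.length ≤ 10 ∧ (bank.toList.take (bank.length - 1)).all (fun c => c == '0') = true) ∨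
    (12 ≤ bank.length ∧ bank.toList.all Char.isDigit = true)
instance (bank : String) : Decidable (Pre_get_max_joltage_v2 bank) := by unfold Pre_get_max_joltage_v2; infer_instance
def pvWitness_get_max_joltage_v2 : String := "5209468371090"

def Spec_get_max_joltage_v2 (bank : String) (out : Int) : Prop := out = get_max_joltage_v2_alt bank
instance (bank : String) (out : Int) : Decidable (Spec_get_max_joltage_v2 bank out) := by unfold Spec_get_max_joltage_v2; infer_instance

-- ===== CLAIM (what is proved, stated in full; the proofs are below) =====
def Claim_equal_get_max_joltage_v2 : Prop := ∀ (bank : String), Dom_get_max_joltage_v2 bank → Pre_get_max_joltage_v2 bank → Spec_get_max_joltage_v2 bank (get_max_joltage_v2 bank)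

-- ===== LEMMAS AND PROOFS =====

-- named version of A's outer fold body (definitionally equal to the port's lambda)
def fA (bank : String) (s : Int × Int × String) (i : Int) : Int × Int × String :=
  let r := get_max_digit bank (s.1 + 1) (12 - i)
  (r.1, r.2, s.2.2 ++ PySem.Int.toStr r.2)

lemma A_eq (bank : String) :
    get_max_joltage_v2 bank =
      (PySem.Int.ofStr? (((PySem.List.pyRange 0 12 1).foldl (fA bank) ((-1 : Int), (0 : Int), "")).2.2)).getD 0 := rfl

-- int() value of a single digit character
def vCh (c : Char) : Int := (PySem.Int.ofStr? (String.singleton c)).getD 0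

lemma ofStr?_digit (c : Char) (h : c.isDigit = true) :
    PySem.Int.ofStr? (String.singleton c) = some ((c.toNat : Int) - 48) := by
  have hs : PySem.Int.ofStr? (String.singleton c) = PySem.Int.ofChars? [c] := by
    simp [PySem.Int.ofStr?]
  rw [hs]
  have hb : 48 ≤ c.toNat ∧ c.toNat ≤ 57 := by
    revert h; simp [Char.isDigit, UInt32.le_iff_toNat_le]
  obtain ⟨h1, h2⟩ := hb
  have hc := Char.ofNat_toNat c
  set k := c.toNat with hk
  interval_cases k <;> (rw [← hc]; decide)

lemma digit_bounds (c : Char) (h : c.isDigit = true) : 48 ≤ c.toNat ∧ c.toNat ≤ 57 := by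
  revert h; simp [Char.isDigit, UInt32.le_iff_toNat_le]

lemma vCh_digit (c : Char) (h : c.isDigit = true) : vCh c = (c.toNat : Int) - 48 := by
  simp [vCh, ofStr?_digit c h]

lemma vCh_nonneg (c : Char) (h : c.isDigit = true) : 0 ≤ vCh c := by
  have := digit_bounds c h; rw [vCh_digit c h]; omega

-- running maximum of digit values (over the character window)
def vmaxw (w : List Char) (m : Int) : Int := w.foldr (fun c M => max (vCh c) M) m

lemma vmaxw_nil (m : Int) : vmaxw [] m = m := rfl
lemma vmaxw_cons (c : Char) (t : List Char) (m : Int) :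
    vmaxw (c :: t) m = max (vCh c) (vmaxw t m) := rfl

lemma le_vmaxw (w : List Char) (m : Int) : m ≤ vmaxw w m := by
  induction w with
  | nil => simp [vmaxw_nil]
  | cons c t ih => rw [vmaxw_cons]; omega

lemma vmaxw_shift (w : List Char) (a m : Int) (h : m ≤ a) :
    vmaxw w a = max a (vmaxw w m) := by
  induction w with
  | nil => simp [vmaxw_nil]; omega
  | cons c t ih => rw [vmaxw_cons, vmaxw_cons, ih]; omega

lemma vmaxw_mem {c : Char} {w : List Char} (h : c ∈ w) (m : Int) : vCh c ≤ vmaxw w m := by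
  induction w with
  | nil => cases h
  | cons x t ih =>
    rw [vmaxw_cons]
    rcases List.mem_cons.mp h with h1 | h2
    · subst h1; omega
    · have := ih h2; omega

lemma vmaxw_le (w : List Char) (m b : Int) (hm : m ≤ b) (h : ∀ c ∈ w, vCh c ≤ b) :
    vmaxw w m ≤ b := by
  induction w with
  | nil => simpa [vmaxw_nil]
  | cons c t ih =>
    rw [vmaxw_cons]
    have h1 := h c (List.mem_cons_self ..)
    have h2 := ih (fun c hc => h c (List.mem_cons_of_mem _ hc))
    omega

-- A's inner scan (fold over enumerate) as a structural recursion
def scanw (start : Int) : List Char → Int → Int × Int → Int × Int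
  | [], _, st => st
  | c :: t, j, st => scanw start t (j + 1) (if vCh c > st.2 then (start + j, vCh c) else st)

lemma enum_foldl (start : Int) : ∀ (w : List Char) (j : Int) (st : Int × Int),
    (PySem.List.enumerate w j).foldl
      (fun (st : Int × Int) (p : Int × Char) =>
        if (PySem.Int.ofStr? (String.singleton p.2)).getD 0 > st.2
        then (start + p.1, (PySem.Int.ofStr? (String.singleton p.2)).getD 0) else st) st
    = scanw start w j st := by
  intro w
  induction w with
  | nil => intro j st; simp [PySem.List.enumerate, scanw]
  | cons c t ih =>
    intro j st
    simp only [PySem.List.enumerate, List.foldl_cons, scanw]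
    rw [ih]
    rfl

lemma scanw_spec (start : Int) : ∀ (w : List Char) (j loc m : Int),
    scanw start w j (loc, m) =
      ((if vmaxw w m = m then loc
        else start + j + (w.findIdx (fun c => vCh c == vmaxw w m) : Int)), vmaxw w m) := by
  intro w
  induction w with
  | nil => intro j loc m; simp [scanw, vmaxw_nil]
  | cons c t ih =>
    intro j loc m
    rw [scanw, vmaxw_cons]
    by_cases hc : vCh c > m
    · rw [if_pos hc, ih]
      have hsh : vmaxw t (vCh c) = max (vCh c) (vmaxw t m) := vmaxw_shift t (vCh c) m (by omega)
      by_cases h1 : vmaxw t (vCh c) = vCh c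
      · have hm : max (vCh c) (vmaxw t m) = vCh c := by omega
        rw [if_pos h1, hm, if_neg (by omega)]
        rw [List.findIdx_cons]
        simp only [show (vCh c == vCh c) = true from beq_self_eq_true _, cond_true]
        simp [h1]
      · have hlt : vCh c < vmaxw t (vCh c) := by
          have := le_vmaxw t (vCh c); omega
        have hm : max (vCh c) (vmaxw t m) = vmaxw t (vCh c) := by omega
        rw [if_neg h1, hm, if_neg (by omega)]
        rw [List.findIdx_cons]
        have hne : (vCh c == vmaxw t (vCh c)) = false := by
          simp [beq_eq_false_iff_ne]; omega
        simp only [hne, cond_false]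
        rw [Prod.mk.injEq]
        refine ⟨by push_cast; ring, rfl⟩
    · rw [if_neg hc, ih]
      have hle : vCh c ≤ m := by omega
      have hm : max (vCh c) (vmaxw t m) = vmaxw t m := by
        have := le_vmaxw t m; omega
      rw [hm]
      by_cases h1 : vmaxw t m = m
      · rw [if_pos h1, if_pos h1]
      · rw [if_neg h1, if_neg h1]
        rw [List.findIdx_cons]
        have hne : (vCh c == vmaxw t m) = false := by
          have := le_vmaxw t m
          simp [beq_eq_false_iff_ne]; omega
        simp only [hne, cond_false]
        rw [Prod.mk.injEq]
        refine ⟨by push_cast; ring, rfl⟩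

lemma clampIdx_nonneg_arg (n : Nat) (i : Int) (h : 0 ≤ i) :
    PySem.List.clampIdx n i = min i.toNat n := by
  simp [PySem.List.clampIdx]
  omega

lemma get_max_digit_eq (bank : String) (start ml : Int) :
    get_max_digit bank start ml =
      ((if vmaxw (PySem.Chars.slice bank.toList (some start) (some ((bank.length : Int) - ml + 1))) 0 = 0
        then start
        else start + ((PySem.Chars.slice bank.toList (some start) (some ((bank.length : Int) - ml + 1))).findIdx
            (fun c => vCh c == vmaxw (PySem.Chars.slice bank.toList (some start) (some ((bank.length : Int) - ml + 1))) 0) : Int)),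
       vmaxw (PySem.Chars.slice bank.toList (some start) (some ((bank.length : Int) - ml + 1))) 0) := by
  have h1 : get_max_digit bank start ml
      = (PySem.List.enumerate (PySem.Str.slice bank (some start) (some ((bank.length : Int) - ml + 1))).toList 0).foldl
          (fun (st : Int × Int) (p : Int × Char) =>
            if (PySem.Int.ofStr? (String.singleton p.2)).getD 0 > st.2
            then (start + p.1, (PySem.Int.ofStr? (String.singleton p.2)).getD 0) else st) (start, 0) := rfl
  rw [h1]
  have hsl : (PySem.Str.slice bank (some start) (some ((bank.length : Int) - ml + 1))).toList
      = PySem.Chars.slice bank.toList (some start) (some ((bank.length : Int) - ml + 1)) := by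
    simp [PySem.Str.slice]
  rw [hsl, enum_foldl, scanw_spec]
  by_cases h : vmaxw (PySem.Chars.slice bank.toList (some start) (some ((bank.length : Int) - ml + 1))) 0 = 0
  · rw [if_pos h, if_pos h]
  · rw [if_neg h, if_neg h, Prod.mk.injEq]
    refine ⟨by ring, rfl⟩

lemma intercalate_nil_char (l : List (List Char)) :
    List.intercalate ([] : List Char) l = l.flatten := by
  induction l with
  | nil => rfl
  | cons x t ih =>
    cases t with
    | nil => simp [List.intercalate]
    | cons y u =>
      simp only [List.intercalate] at *
      simp [List.intersperse] at *
      simpa using ih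

-- the slice [a, e) with 0 ≤ a, 0 ≤ e ≤ n as take/drop
lemma slice_eq (L : List Char) (a e : Int) (h0 : 0 ≤ a) (h1 : 0 ≤ e)
    (ha : a.toNat ≤ L.length) (he : e.toNat ≤ L.length) :
    PySem.Chars.slice L (some a) (some e) = (L.drop a.toNat).take (e.toNat - a.toNat) := by
  show PySem.List.slice _ _ _ = _
  simp only [PySem.List.slice, clampIdx_nonneg_arg _ _ h0, clampIdx_nonneg_arg _ _ h1]
  rw [min_eq_left ha, min_eq_left he]

-- ===== value-level machinery: maximum, greedy specification, monotonic stack =====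

def imax (w : List Int) (m : Int) : Int := w.foldr (fun c M => max c M) m

lemma vmaxw_map (w : List Char) (m : Int) : vmaxw w m = imax (w.map vCh) m := by
  induction w with
  | nil => rfl
  | cons c t ih =>
    rw [vmaxw_cons, List.map_cons, ih]
    rfl

lemma imax_ge {x : Int} {w : List Int} (h : x ∈ w) (m : Int) : x ≤ imax w m := by
  induction w with
  | nil => cases h
  | cons c t ih =>
    simp only [imax, List.foldr_cons] at *
    rcases List.mem_cons.mp h with h1 | h2
    · subst h1; omega
    · have := ih h2; omega

lemma imax_mem (w : List Int) (hw : w ≠ []) (h0 : ∀ x ∈ w, 0 ≤ x) : imax w 0 ∈ w := by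
  induction w with
  | nil => exact absurd rfl hw
  | cons c t ih =>
    by_cases ht : t = []
    · subst ht
      have : imax [c] 0 = max c 0 := rfl
      have hc := h0 c (List.mem_cons_self ..)
      simp only [this, max_eq_left hc, List.mem_singleton]
    · have hm := ih ht (fun x hx => h0 x (List.mem_cons_of_mem _ hx))
      have hstep : imax (c :: t) 0 = max c (imax t 0) := rfl
      rw [hstep]
      by_cases hcm : imax t 0 ≤ c
      · rw [max_eq_left hcm]; exact List.mem_cons_self ..
      · rw [max_eq_right (not_le.mp hcm).le]; exact List.mem_cons_of_mem _ hm

-- greedy specification: repeatedly take the leftmost maximum of the feasible window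
def greedy : Nat → List Int → List Int
  | 0, _ => []
  | k + 1, d =>
    let w := d.take (d.length - k)
    let m := imax w 0
    m :: greedy k (d.drop (w.findIdx (fun x => x == m) + 1))

-- generalized monotonic stack (k = capacity, extra = elements beyond the processed chunk)
def gpop (k : Nat) (c : Int) (rem : Nat) : List Int → List Int
  | [] => []
  | x :: s => if x < c ∧ s.length + 1 + rem > k then gpop k c rem s else x :: s

def gstep (k : Nat) (c : Int) (rem : Nat) (s : List Int) : List Int :=
  let s' := gpop k c rem s
  if s'.length < k then c :: s' else s'

def chunk (k : Nat) (extra : Nat) : List Int → List Int → List Int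
  | s, [] => s
  | s, c :: t => chunk k extra (gstep k c (t.length + 1 + extra) s) t

lemma bPop_gpop (d : Int) (rem : Nat) : ∀ s, bPop d rem s = gpop 12 d rem s := by
  intro s
  induction s with
  | nil => rfl
  | cons x s ih => simp only [bPop, gpop, ih]

lemma bLoop_chunk : ∀ (l : List Char) (s : List Int), bLoop s l = chunk 12 0 s (l.map vCh) := by
  intro l
  induction l with
  | nil => intro s; rfl
  | cons c t ih =>
    intro s
    simp only [bLoop, List.map_cons, chunk, ih, List.length_map, bPop_gpop]
    rfl

lemma chunk_append (k : Nat) : ∀ (u : List Int) (v : List Int) (extra : Nat) (s : List Int),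
    chunk k extra s (u ++ v) = chunk k extra (chunk k (v.length + extra) s u) v := by
  intro u
  induction u with
  | nil => intro v extra s; rfl
  | cons c t ih =>
    intro v extra s
    simp only [List.cons_append, chunk, List.length_append]
    rw [show t.length + v.length + 1 + extra = t.length + 1 + (v.length + extra) by omega, ih]

lemma gpop_subset (k : Nat) (c : Int) (rem : Nat) : ∀ s, gpop k c rem s ⊆ s := by
  intro s
  induction s with
  | nil => exact fun x h => h
  | cons x s ih =>
    simp only [gpop]
    split_ifs with h
    · exact fun y hy => List.mem_cons_of_mem _ (ih hy)
    · exact fun y hy => hy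

lemma gstep_subset (k : Nat) (c : Int) (rem : Nat) (s : List Int) {x : Int}
    (h : x ∈ gstep k c rem s) : x ∈ s ∨ x = c := by
  simp only [gstep] at h
  split_ifs at h with hl
  · rcases List.mem_cons.mp h with h1 | h2
    · right; exact h1
    · left; exact gpop_subset k c rem s h2
  · left; exact gpop_subset k c rem s h

lemma chunk_subset (k extra : Nat) : ∀ (u : List Int) (s : List Int) {x : Int},
    x ∈ chunk k extra s u → x ∈ s ∨ x ∈ u := by
  intro u
  induction u with
  | nil => intro s x h; left; exact h
  | cons c t ih =>
    intro s x h
    simp only [chunk] at h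
    rcases ih _ h with h1 | h2
    · rcases gstep_subset _ _ _ _ h1 with h3 | h4
      · left; exact h3
      · right; subst h4; exact List.mem_cons_self ..
    · right; exact List.mem_cons_of_mem _ h2

lemma gpop_popall (k : Nat) (c : Int) (rem : Nat) (hrem : k ≤ rem) :
    ∀ s, (∀ x ∈ s, x < c) → gpop k c rem s = [] := by
  intro s
  induction s with
  | nil => intro _; rfl
  | cons x s ih =>
    intro h
    simp only [gpop]
    rw [if_pos ⟨h x (List.mem_cons_self ..), by omega⟩]
    exact ih (fun y hy => h y (List.mem_cons_of_mem _ hy))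

lemma gstep_popall (k : Nat) (c : Int) (rem : Nat) (hrem : k ≤ rem) (hk : 0 < k)
    (s : List Int) (h : ∀ x ∈ s, x < c) : gstep k c rem s = [c] := by
  simp only [gstep, gpop_popall k c rem hrem s h]
  rw [if_pos (by simpa using hk)]

lemma gpop_shift (k : Nat) (m c : Int) (rem : Nat) (h : rem > k → c ≤ m) :
    ∀ s', gpop (k + 1) c rem (s' ++ [m]) = gpop k c rem s' ++ [m] := by
  intro s'
  induction s' with
  | nil =>
    simp only [List.nil_append, gpop]
    rw [if_neg (by
      rintro ⟨h1, h2⟩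
      simp only [List.length_nil] at h2
      have := h (by omega)
      omega)]
  | cons x s ih =>
    simp only [List.cons_append, gpop]
    by_cases hc : x < c ∧ s.length + 1 + rem > k
    · rw [if_pos ⟨hc.1, by have := hc.2; simp; omega⟩, if_pos hc, ih]
    · rw [if_neg (fun hh => hc ⟨hh.1, by have := hh.2; simp at this; omega⟩), if_neg hc,
        List.cons_append]

lemma gstep_shift (k : Nat) (m c : Int) (rem : Nat) (h : rem > k → c ≤ m) (s' : List Int) :
    gstep (k + 1) c rem (s' ++ [m]) = gstep k c rem s' ++ [m] := by
  simp only [gstep, gpop_shift k m c rem h, List.length_append, List.length_cons, List.length_nil]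
  by_cases hl : (gpop k c rem s').length < k
  · rw [if_pos (by omega), if_pos hl, List.cons_append]
  · rw [if_neg (by omega), if_neg hl]

lemma take_mono_subset {α : Type} (l : List α) {a b : Nat} (h : a ≤ b) : l.take a ⊆ l.take b := by
  intro x hx
  rw [show a = min a b by omega, ← List.take_take] at hx
  exact List.take_subset _ _ hx

lemma chunk_shift (k : Nat) (m : Int) : ∀ (t : List Int) (s' : List Int),
    (∀ c ∈ t.take (t.length - k), c ≤ m) →
    chunk (k + 1) 0 (s' ++ [m]) t = chunk k 0 s' t ++ [m] := by
  intro t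
  induction t with
  | nil => intro s' _; rfl
  | cons c t ih =>
    intro s' H
    simp only [chunk]
    rw [gstep_shift k m c (t.length + 1 + 0)
      (by
        intro hr
        apply H
        have h1 : 1 ≤ (c :: t).length - k := by simp; omega
        obtain ⟨n, hn⟩ : ∃ n, (c :: t).length - k = n + 1 := ⟨_, (Nat.succ_pred_eq_of_pos h1).symm⟩
        rw [hn, List.take_succ_cons]
        exact List.mem_cons_self ..)]
    apply ih
    intro x hx
    apply H
    rcases Nat.lt_or_ge k t.length with hlt | hge
    · have h2 : (c :: t).length - k = (t.length - k) + 1 := by simp; omega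
      rw [h2, List.take_succ_cons]
      exact List.mem_cons_of_mem _ hx
    · have h2 : t.length - k = 0 := by omega
      rw [h2, List.take_zero] at hx
      cases hx

lemma chunk_zero (extra : Nat) : ∀ (d : List Int), chunk 0 extra [] d = [] := by
  intro d
  induction d with
  | nil => rfl
  | cons c t ih =>
    simp only [chunk, gstep, gpop]
    rw [if_neg (by omega)]
    exact ih

lemma stack_greedy : ∀ (k : Nat) (d : List Int), (∀ x ∈ d, 0 ≤ x) → k ≤ d.length →
    chunk k 0 [] d = (greedy k d).reverse := by
  intro k
  induction k with
  | zero => intro d _ _; rw [chunk_zero]; rfl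
  | succ k ih =>
    intro d hpos hk
    set n := d.length with hn
    set w := d.take (n - k) with hwdef
    set m := imax w 0 with hmdef
    set j := w.findIdx (fun x => x == m) with hjdef
    have hwlen : w.length = n - k := by
      rw [hwdef, List.length_take]; omega
    have hwne : w ≠ [] := by
      intro h; rw [h] at hwlen; simp at hwlen; omega
    have hm : m ∈ w := imax_mem w hwne (fun x hx => hpos x (List.take_subset _ _ hx))
    have hj : j < w.length := List.findIdx_lt_length.mpr ⟨m, hm, beq_self_eq_true m⟩
    have hjd : j < d.length := by omega
    have hdj : d[j] = m := by
      have h1 : (w[j]'hj == m) = true := List.findIdx_getElem (w := hjdef ▸ hj)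
      have h2 : w[j]'hj = d[j]'hjd := List.getElem_take
      rw [h2] at h1
      exact eq_of_beq h1
    have hdecomp : d = d.take j ++ (m :: d.drop (j + 1)) := by
      conv_lhs => rw [← List.take_append_drop j d]
      rw [List.drop_eq_getElem_cons hjd, hdj]
    have htlen : (d.drop (j + 1)).length = n - (j + 1) := by simp [hn]
    have hult : ∀ x ∈ d.take j, x < m := by
      intro x hx
      obtain ⟨i, hi, hxi⟩ := List.mem_iff_getElem.mp hx
      have hij : i < j := by
        have := List.length_take_le j d
        simp only [List.length_take] at hi
        omega
      have hiw : i < w.length := by omega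
      have hgt : (d.take j)[i]'hi = d[i]'(by omega) := List.getElem_take
      have hwi : w[i]'hiw = d[i]'(by omega) := List.getElem_take
      have hne : ¬ ((w[i]'hiw == m) = true) := by
        simpa using List.not_of_lt_findIdx (p := fun x => x == m) (hjdef ▸ hij)
      have hxe : x = w[i]'hiw := by rw [hwi, ← hgt, hxi]
      have hle : x ≤ m := hmdef ▸ imax_ge (hxe ▸ List.getElem_mem hiw) 0
      have hxm : x ≠ m := fun he => hne (by rw [← hxe, he]; exact beq_self_eq_true m)
      exact lt_of_le_of_ne hle hxm
    have hs1 : ∀ x ∈ chunk (k + 1) ((m :: d.drop (j + 1)).length + 0) [] (d.take j), x < m := by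
      intro x hx
      rcases chunk_subset _ _ _ _ hx with h1 | h2
      · cases h1
      · exact hult x h2
    have hremk : k + 1 ≤ (d.drop (j + 1)).length + 1 + 0 := by omega
    have hH : ∀ c ∈ (d.drop (j + 1)).take ((d.drop (j + 1)).length - k), c ≤ m := by
      intro c hc
      have he : (d.drop (j + 1)).take ((d.drop (j + 1)).length - k) = w.drop (j + 1) := by
        rw [hwdef, List.drop_take, htlen]
        congr 1
        omega
      rw [he] at hc
      exact hmdef ▸ imax_ge (List.drop_subset _ _ hc) 0
    calc chunk (k + 1) 0 [] d
        = chunk (k + 1) 0 [] (d.take j ++ (m :: d.drop (j + 1))) := by rw [← hdecomp]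
      _ = chunk (k + 1) 0 (chunk (k + 1) ((m :: d.drop (j + 1)).length + 0) [] (d.take j))
            (m :: d.drop (j + 1)) := chunk_append (k + 1) _ _ _ _
      _ = chunk (k + 1) 0
            (gstep (k + 1) m ((d.drop (j + 1)).length + 1 + 0)
              (chunk (k + 1) ((m :: d.drop (j + 1)).length + 0) [] (d.take j)))
            (d.drop (j + 1)) := rfl
      _ = chunk (k + 1) 0 ([] ++ [m]) (d.drop (j + 1)) := by
            rw [gstep_popall (k + 1) m _ hremk (by omega) _ hs1]
            rfl
      _ = chunk k 0 [] (d.drop (j + 1)) ++ [m] := chunk_shift k m _ [] hH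
      _ = (greedy k (d.drop (j + 1))).reverse ++ [m] := by
            rw [ih (d.drop (j + 1)) (fun x hx => hpos x (List.drop_subset _ _ hx)) (by omega)]
      _ = (m :: greedy k (d.drop (j + 1))).reverse := by simp
      _ = (greedy (k + 1) d).reverse := rfl

-- ===== A-side: the outer fold realizes the greedy specification =====

lemma Afold (bank : String) (hall : bank.toList.all Char.isDigit = true) :
    ∀ (k : Nat), k ≤ 12 → ∀ (start : Nat), start + k ≤ bank.toList.length →
      ∀ (loc : Int), loc + 1 = (start : Int) → ∀ (md : Int) (acc : String),
      (((PySem.List.pyRange (12 - (k : Int)) 12 1).foldl (fA bank) (loc, md, acc)).2.2).toList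
        = acc.toList ++ (greedy k ((bank.toList.map vCh).drop start)).flatMap
            (fun v => (PySem.Int.toStr v).toList) := by
  intro k
  induction k with
  | zero =>
    intro _ start hs loc hloc md acc
    norm_num [PySem.List.pyRange, greedy]
  | succ k ih =>
    intro hk start hs loc hloc md acc
    set L := bank.toList with hLdef
    set n := L.length with hndef
    have hL : (L.length : Int) = (bank.length : Int) := by simp [hLdef]
    -- the window of step i = 12 - (k+1), as characters and as values
    set d' := (L.map vCh).drop start with hd'def
    have hd'len : d'.length = n - start := by simp [hd'def, hndef]
    set w' := d'.take (d'.length - k) with hw'def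
    set mm := imax w' 0 with hmmdef
    set jj := w'.findIdx (fun x => x == mm) with hjjdef
    set wch := (L.drop start).take (n - start - k) with hwchdef
    have hwmap : wch.map vCh = w' := by
      rw [hwchdef, hw'def, hd'def, List.map_take, List.map_drop, hd'len]
    have hwchlen : wch.length = n - start - k := by
      simp [hwchdef, hndef]
    have hwchne : wch ≠ [] := by
      intro h; rw [h] at hwchlen; simp at hwchlen; omega
    have hwchd : ∀ c ∈ wch, c.isDigit = true := by
      intro c hc
      exact List.all_eq_true.mp hall c (List.drop_subset _ _ (List.take_subset _ _ hc))
    -- the slice A scans is wch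
    have hsl : PySem.Chars.slice L (some (loc + 1))
        (some ((bank.length : Int) - (12 - (12 - ((k : Int) + 1))) + 1)) = wch := by
      have he1 : (bank.length : Int) - (12 - (12 - ((k : Int) + 1))) + 1
          = ((n - k : Nat) : Int) := by
        rw [← hL]
        push_cast [Nat.cast_sub (by omega : k ≤ n)]
        ring
      rw [he1, hloc, slice_eq L _ _ (by positivity) (by positivity)
        (by simp; omega) (by simp; omega)]
      rw [hwchdef]
      congr 1 <;> simp <;> omega
    -- A's step
    have hvm : vmaxw wch 0 = mm := by rw [vmaxw_map, hwmap, hmmdef]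
    have hfind : wch.findIdx (fun c => vCh c == mm) = jj := by
      rw [hjjdef, ← hwmap, List.findIdx_map]
      rfl
    have hmmmem : mm ∈ w' := by
      rw [hmmdef]
      exact imax_mem w' (by rw [← hwmap]; simp [hwchne])
        (fun x hx => by
          rw [← hwmap] at hx
          obtain ⟨c, hc, hcx⟩ := List.mem_map.mp hx
          exact hcx ▸ vCh_nonneg c (hwchd c hc))
    have hjlt : jj < w'.length := by
      rw [hjjdef]
      exact List.findIdx_lt_length.mpr ⟨mm, hmmmem, beq_self_eq_true mm⟩
    have hjlt' : jj < n - start - k := by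
      have : w'.length = n - start - k := by rw [← hwmap, List.length_map, hwchlen]
      omega
    -- unified location: start + jj  (in the all-zero window case jj = 0)
    have hloc' : (if vmaxw wch 0 = 0 then (loc + 1)
        else loc + 1 + (wch.findIdx (fun c => vCh c == vmaxw wch 0) : Int))
        = (start : Int) + (jj : Int) := by
      rw [hvm]
      by_cases h0 : mm = 0
      · rw [if_pos h0]
        obtain ⟨c, t, hct⟩ := List.exists_cons_of_ne_nil hwchne
        have hc0 : vCh c = 0 := by
          have h1 : vCh c ≤ vmaxw wch 0 := vmaxw_mem (by rw [hct]; exact List.mem_cons_self ..) 0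
          have h2 : 0 ≤ vCh c := vCh_nonneg c (hwchd c (by rw [hct]; exact List.mem_cons_self ..))
          rw [hvm, h0] at h1
          omega
        have hj0 : jj = 0 := by
          rw [← hfind, hct, List.findIdx_cons, hc0, h0]
          simp
        rw [hj0, hloc]
        simp
      · rw [if_neg h0, hfind, hloc]
    have hstep : fA bank (loc, md, acc) (12 - ((k : Int) + 1))
        = ((start : Int) + (jj : Int) , mm, acc ++ PySem.Int.toStr mm) := by
      show (let r := get_max_digit bank (loc + 1) (12 - (12 - ((k : Int) + 1)));
        (r.1, r.2, acc ++ PySem.Int.toStr r.2)) = _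
      rw [get_max_digit_eq, hsl]
      rw [Prod.mk.injEq]
      refine ⟨hloc', by rw [hvm]⟩
    -- peel one step off the range and apply the induction hypothesis
    have hrw : PySem.List.pyRange (12 - ((k + 1 : Nat) : Int)) 12 1
        = (12 - ((k : Int) + 1)) :: PySem.List.pyRange (12 - (k : Int)) 12 1 := by
      rw [show ((k + 1 : Nat) : Int) = (k : Int) + 1 by push_cast; ring,
        PySem.List.pyRange_one_cons (by omega),
        show 12 - ((k : Int) + 1) + 1 = 12 - (k : Int) by ring]
    rw [hrw, List.foldl_cons, hstep,
      ih (by omega) (start + jj + 1) (by omega) ((start : Int) + (jj : Int))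
        (by push_cast; ring) mm (acc ++ PySem.Int.toStr mm)]
    have hgr : greedy (k + 1) d' = mm :: greedy k (d'.drop (jj + 1)) := rfl
    have hdd : d'.drop (jj + 1) = (L.map vCh).drop (start + jj + 1) := by
      rw [hd'def, List.drop_drop, show start + (jj + 1) = start + jj + 1 by omega]
    rw [hgr, hdd]
    simp

-- ===== A-side: all-zero windows for short banks =====

lemma zeroFold (bank : String)
    (hz : ∀ (i : Int), 0 ≤ i → i ≤ 11 → ∀ (start : Int), i ≤ start →
      ∀ c ∈ PySem.Chars.slice bank.toList (some start) (some ((bank.length : Int) - (12 - i) + 1)), vCh c = 0) :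
    ∀ (k : Nat), k ≤ 12 → ∀ (md : Int) (acc : String),
      (((PySem.List.pyRange (12 - (k : Int)) 12 1).foldl (fA bank) ((12 - (k : Int)) - 1, md, acc)).2.2).toList
        = acc.toList ++ List.replicate k '0' := by
  intro k
  induction k with
  | zero =>
    intro _ md acc
    norm_num [PySem.List.pyRange]
  | succ k ih =>
    intro hk md acc
    have hrw : PySem.List.pyRange (12 - ((k + 1 : Nat) : Int)) 12 1
        = (12 - ((k : Int) + 1)) :: PySem.List.pyRange (12 - (k : Int)) 12 1 := by
      rw [show ((k + 1 : Nat) : Int) = (k : Int) + 1 by push_cast; ring,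
        PySem.List.pyRange_one_cons (by omega),
        show 12 - ((k : Int) + 1) + 1 = 12 - (k : Int) by ring]
    have hzw := hz (12 - ((k : Int) + 1)) (by omega) (by omega) (12 - ((k : Int) + 1)) le_rfl
    have hvm : vmaxw (PySem.Chars.slice bank.toList (some (12 - ((k : Int) + 1)))
        (some ((bank.length : Int) - (12 - (12 - ((k : Int) + 1))) + 1))) 0 = 0 := by
      have h1 := le_vmaxw (PySem.Chars.slice bank.toList (some (12 - ((k : Int) + 1)))
        (some ((bank.length : Int) - (12 - (12 - ((k : Int) + 1))) + 1))) 0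
      have h2 := vmaxw_le (PySem.Chars.slice bank.toList (some (12 - ((k : Int) + 1)))
        (some ((bank.length : Int) - (12 - (12 - ((k : Int) + 1))) + 1))) 0 0 le_rfl
        (fun c hc => le_of_eq (hzw c hc))
      omega
    have hstep : fA bank ((12 - ((k + 1 : Nat) : Int)) - 1, md, acc) (12 - ((k : Int) + 1))
        = ((12 - ((k : Int) + 1)), 0, acc ++ PySem.Int.toStr 0) := by
      show (let r := get_max_digit bank ((12 - ((k + 1 : Nat) : Int)) - 1 + 1) (12 - (12 - ((k : Int) + 1)));
        (r.1, r.2, acc ++ PySem.Int.toStr r.2)) = _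
      rw [show (12 - ((k + 1 : Nat) : Int)) - 1 + 1 = 12 - ((k : Int) + 1) by push_cast; ring,
        get_max_digit_eq, if_pos hvm, hvm]
    rw [hrw, List.foldl_cons, hstep,
      show (12 - ((k : Int) + 1)) = (12 - (k : Int)) - 1 by ring,
      ih (by omega) 0 (acc ++ PySem.Int.toStr 0)]
    have h0s : PySem.Int.toStr 0 = "0" := rfl
    rw [h0s]
    simp [List.replicate_succ]

-- short banks: every window consists of zeros only (or is empty)
lemma short_windows (bank : String)
    (hsh : bank.toList.length ≤ 5 ∨ bank.toList.length = 11 ∨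
      (bank.toList.length ≤ 10 ∧ ∀ c ∈ bank.toList.take (bank.toList.length - 1), vCh c = 0)) :
    ∀ (i : Int), 0 ≤ i → i ≤ 11 → ∀ (start : Int), i ≤ start →
      ∀ c ∈ PySem.Chars.slice bank.toList (some start) (some ((bank.length : Int) - (12 - i) + 1)), vCh c = 0 := by
  intro i h0 h11 start hst c hc
  set L := bank.toList with hLdef
  set n := L.length with hndef
  have hL : (bank.length : Int) = (n : Int) := by simp [hndef, hLdef]
  set e : Int := (bank.length : Int) - (12 - i) + 1 with hedef
  have he2 : e = (n : Int) - 11 + i := by rw [hedef, hL]; ring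
  have hslice : PySem.Chars.slice L (some start) (some e)
      = List.take (PySem.List.clampIdx n e - PySem.List.clampIdx n start)
          (List.drop (PySem.List.clampIdx n start) L) := rfl
  have ha : PySem.List.clampIdx n start = min start.toNat n :=
    clampIdx_nonneg_arg n start (by omega)
  rcases hsh with h5 | h11' | ⟨h10, hz0⟩
  · -- length ≤ 5: every window is empty
    have hempty : PySem.List.clampIdx n e - PySem.List.clampIdx n start = 0 := by
      rw [ha]
      simp only [PySem.List.clampIdx]
      split_ifs <;> omega
    rw [hslice, hempty, List.take_zero] at hc
    cases hc
  · -- length 11: every window is empty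
    have hb : PySem.List.clampIdx n e = min e.toNat n :=
      clampIdx_nonneg_arg n e (by omega)
    have hempty : PySem.List.clampIdx n e - PySem.List.clampIdx n start = 0 := by
      rw [hb, ha]; omega
    rw [hslice, hempty, List.take_zero] at hc
    cases hc
  · by_cases he : e < 0
    · -- wrapped negative end: the window sits inside the first n-1 characters
      have hb : PySem.List.clampIdx n e ≤ n - 1 := by
        simp only [PySem.List.clampIdx]
        split_ifs <;> omega
      have hc2 : c ∈ List.take (n - 1) L := by
        rw [hslice, ← List.drop_take] at hc
        exact take_mono_subset L hb (List.drop_subset _ _ hc)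
      exact hz0 c hc2
    · -- nonnegative end: the window is empty (start ≥ i > e)
      have hb : PySem.List.clampIdx n e = min e.toNat n :=
        clampIdx_nonneg_arg n e (by omega)
      have hempty : PySem.List.clampIdx n e - PySem.List.clampIdx n start = 0 := by
        rw [hb, ha]; omega
      rw [hslice, hempty, List.take_zero] at hc
      cases hc


lemma A_zero (bank : String)
    (hz : ∀ (i : Int), 0 ≤ i → i ≤ 11 → ∀ (start : Int), i ≤ start →
      ∀ c ∈ PySem.Chars.slice bank.toList (some start) (some ((bank.length : Int) - (12 - i) + 1)), vCh c = 0) :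
    get_max_joltage_v2 bank = 0 := by
  rw [A_eq]
  have hZ := zeroFold bank hz 12 le_rfl 0 ""
  norm_num at hZ
  have hs : (((PySem.List.pyRange 0 12 1).foldl (fA bank) ((-1 : Int), (0 : Int), "")).2.2)
      = "000000000000" := by
    apply String.toList_inj.mp
    rw [hZ]
    decide
  rw [hs]
  decide

-- ===== VERDICT (by name: the statement is the Claim_ definition above) =====
theorem get_max_joltage_v2_spec : Claim_equal_get_max_joltage_v2 := by
  intro bank hdom hpre
  show get_max_joltage_v2 bank = get_max_joltage_v2_alt bank
  have hlen : bank.toList.length = bank.length := by simp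
  rcases hpre with h5 | h11 | ⟨h10, hz⟩ | ⟨h12, hall⟩
  · -- length ≤ 5
    rw [A_zero bank (short_windows bank (Or.inl (by omega)))]
    unfold get_max_joltage_v2_alt
    rw [if_pos (by omega)]
  · -- length 11
    rw [A_zero bank (short_windows bank (Or.inr (Or.inl (by omega))))]
    unfold get_max_joltage_v2_alt
    rw [if_pos (by omega)]
  · -- length ≤ 10, scanned prefix all '0'
    have hz0 : ∀ c ∈ bank.toList.take (bank.toList.length - 1), vCh c = 0 := by
      intro c hc
      rw [hlen] at hc
      have h0 : c = '0' := by simpa using List.all_eq_true.mp hz c hc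
      rw [h0]
      decide
    rw [A_zero bank (short_windows bank (Or.inr (Or.inr ⟨by omega, hz0⟩)))]
    unfold get_max_joltage_v2_alt
    rw [if_pos (by omega)]
  · -- length ≥ 12, all digits: greedy = monotonic stack
    have hA := Afold bank hall 12 le_rfl 0 (by omega) (-1) (by norm_num) 0 ""
    norm_num at hA
    have hstack : bLoop [] bank.toList = (greedy 12 (bank.toList.map vCh)).reverse := by
      rw [bLoop_chunk]
      exact stack_greedy 12 _
        (fun x hx => by
          obtain ⟨c, hc, rfl⟩ := List.mem_map.mp hx
          exact vCh_nonneg c (List.all_eq_true.mp hall c hc))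
        (by simp; omega)
    have hB : get_max_joltage_v2_alt bank
        = (PySem.Int.ofStr? (PySem.Str.join ""
            (((bLoop [] bank.toList).reverse).map PySem.Int.toStr))).getD 0 := by
      unfold get_max_joltage_v2_alt
      rw [if_neg (by omega)]
    rw [A_eq, hB]
    have hseq : (((PySem.List.pyRange 0 12 1).foldl (fA bank) ((-1 : Int), (0 : Int), "")).2.2)
        = PySem.Str.join "" (((bLoop [] bank.toList).reverse).map PySem.Int.toStr) := by
      apply String.toList_inj.mp
      rw [hA, hstack, List.reverse_reverse]
      simp [PySem.Str.join, PySem.Chars.join, intercalate_nil_char, List.flatMap_def,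
        List.map_map, Function.comp_def]
    rw [hseq]
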